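-- pv_equiv track=rewrite | github.com/cdslabamotong/LTInfLearning | full_observation/Full_observation_functions.py | binary_mode_to_cascade_mode
-- ===== SOURCE A (Python) =====
-- def binary_mode_to_cascade_mode(binary_list, num_cascade):
--     """
--     Parameters
--     ----------
--     binary_list: list
--     num_cascade: int
--     Returns
--     ---------
--     cascade_mode: int
--     """
--     cascade_mode = 0
--     if binary_list == [0] * num_cascade:
--         cascade_mode = 0
--     count = 1
--     for ele in binary_list:
--         if ele == 1:
--             cascade_mode = count
--         count += 1
--     return cascade_mode
-- ===== SOURCE B (Python) =====
-- def binary_mode_to_cascade_mode(binary_list, num_cascade):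
--     if 1 in binary_list:
--         return len(binary_list) - binary_list[::-1].index(1)
--     return 0
-- ===== Notes on version B (the rewrite author's own statement) =====
-- stated objective: idiomatic
-- what changed: Replaces the forward accumulator loop (tracking a running counter and last-seen position) with a reversed-copy library search: the first index of 1 in binary_list[::-1] gives the answer as len - index, guarded by a membership test; num_cascade remains unused.
import Mathlib
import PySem

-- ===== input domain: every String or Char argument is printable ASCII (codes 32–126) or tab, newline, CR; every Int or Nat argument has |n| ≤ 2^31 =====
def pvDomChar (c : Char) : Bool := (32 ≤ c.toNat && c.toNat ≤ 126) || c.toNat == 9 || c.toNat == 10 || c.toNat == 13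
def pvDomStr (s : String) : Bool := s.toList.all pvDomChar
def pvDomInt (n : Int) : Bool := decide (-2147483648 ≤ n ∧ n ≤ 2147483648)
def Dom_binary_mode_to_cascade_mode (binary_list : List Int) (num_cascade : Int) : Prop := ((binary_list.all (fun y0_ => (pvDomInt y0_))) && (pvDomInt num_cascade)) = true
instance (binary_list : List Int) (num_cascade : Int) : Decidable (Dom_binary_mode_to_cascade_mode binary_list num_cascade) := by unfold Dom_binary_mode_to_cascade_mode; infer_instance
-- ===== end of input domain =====

-- B replaces A's forward accumulator loop by a reversed-copy library search (idiomatic).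

-- ===== PORT A =====
-- cascade_mode = 0; if binary_list == [0]*num_cascade: cascade_mode = 0;
-- then the counted loop carried as a (cascade_mode, count) pair.
def binary_mode_to_cascade_mode (binary_list : List Int) (num_cascade : Int) : Int :=
  let cascade_mode : Int := 0
  let cascade_mode : Int :=
    if binary_list = List.replicate num_cascade.toNat (0 : Int) then 0 else cascade_mode
  (binary_list.foldl
    (fun (s : Int × Int) ele => (if ele = 1 then s.2 else s.1, s.2 + 1))
    (cascade_mode, 1)).1

-- ===== PORT B =====
-- if 1 in binary_list: return len(binary_list) - binary_list[::-1].index(1); return 0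
def binary_mode_to_cascade_mode_alt (binary_list : List Int) (num_cascade : Int) : Int :=
  if (1 : Int) ∈ binary_list then
    (binary_list.length : Int) - ((PySem.List.index? binary_list.reverse (1 : Int)).getD 0 : Nat)
  else 0

-- ===== PRECONDITION & SPEC =====
def Spec_binary_mode_to_cascade_mode (binary_list : List Int) (num_cascade : Int) (out : Int) : Prop := out = binary_mode_to_cascade_mode_alt binary_list num_cascade
instance (binary_list : List Int) (num_cascade : Int) (out : Int) : Decidable (Spec_binary_mode_to_cascade_mode binary_list num_cascade out) := by unfold Spec_binary_mode_to_cascade_mode; infer_instance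

-- ===== CLAIM (what is proved, stated in full; the proofs are below) =====
def Claim_equal_binary_mode_to_cascade_mode : Prop := ∀ (binary_list : List Int) (num_cascade : Int), Dom_binary_mode_to_cascade_mode binary_list num_cascade → Spec_binary_mode_to_cascade_mode binary_list num_cascade (binary_mode_to_cascade_mode binary_list num_cascade)

-- ===== LEMMAS AND PROOFS =====

-- 0-based position of the LAST occurrence of 1, as a structural recursion.
def pvLastOne : List Int → Option Nat
  | [] => none
  | x :: xs =>
    match pvLastOne xs with
    | some j => some (j + 1)
    | none => if x = 1 then some 0 else none

theorem pvLastOne_none_iff (l : List Int) : pvLastOne l = none ↔ (1 : Int) ∉ l := by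
  induction l with
  | nil => simp [pvLastOne]
  | cons x xs ih =>
    cases h : pvLastOne xs with
    | some j =>
      have hmem : (1 : Int) ∈ xs := by
        by_contra hn
        exact absurd (ih.mpr hn) (by simp [h])
      simp [pvLastOne, h, hmem]
    | none =>
      have hn := ih.mp h
      by_cases hx : x = 1 <;> simp [pvLastOne, h, hn, hx, eq_comm]

-- A's counted fold computes the last-1 position shifted by the running count.
theorem pvFoldA (l : List Int) (c k : Int) :
    (l.foldl (fun (s : Int × Int) ele => (if ele = 1 then s.2 else s.1, s.2 + 1)) (c, k)).1
      = match pvLastOne l with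
        | some j => k + j
        | none => c := by
  induction l generalizing c k with
  | nil => simp [pvLastOne]
  | cons x xs ih =>
    simp only [List.foldl_cons, pvLastOne]
    rw [ih]
    cases h : pvLastOne xs with
    | some j => simp; ring
    | none => by_cases hx : x = 1 <;> simp [hx]

theorem pvLastOne_lt (l : List Int) (j : Nat) (h : pvLastOne l = some j) : j < l.length := by
  induction l generalizing j with
  | nil => simp [pvLastOne] at h
  | cons x xs ih =>
    simp only [pvLastOne] at h
    cases hx : pvLastOne xs with
    | some k =>
      rw [hx] at h
      simp at h
      subst h
      have := ih k hx
      simp; omega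
    | none =>
      rw [hx] at h
      by_cases h1 : x = 1 <;> simp [h1] at h
      subst h; simp

-- index? distributes over append (first match wins).
theorem pvIndexAppend (l₁ l₂ : List Int) (v : Int) :
    PySem.List.index? (l₁ ++ l₂) v
      = match PySem.List.index? l₁ v with
        | some i => some i
        | none => (PySem.List.index? l₂ v).map (· + l₁.length) := by
  induction l₁ with
  | nil =>
    simp [PySem.List.index?_eq_idxOf?]
  | cons x xs ih =>
    by_cases hx : x = v
    · subst hx
      simp [PySem.List.index?_eq_idxOf?, List.idxOf?_cons]
    · rw [List.cons_append, PySem.List.index?_cons_of_ne (xs ++ l₂) hx,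
          PySem.List.index?_cons_of_ne xs hx, ih]
      cases h : PySem.List.index? xs v with
      | some i => simp
      | none =>
        cases h₂ : PySem.List.index? l₂ v with
        | none => simp
        | some a => simp; omega

-- First index of 1 in the reverse = length - 1 - last index of 1.
theorem pvIndexReverse (l : List Int) :
    PySem.List.index? l.reverse (1 : Int)
      = (pvLastOne l).map (fun j => l.length - 1 - j) := by
  induction l with
  | nil => simp [pvLastOne, PySem.List.index?_eq_idxOf?]
  | cons x xs ih =>
    rw [List.reverse_cons, pvIndexAppend, ih]
    simp only [pvLastOne]
    cases h : pvLastOne xs with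
    | some j =>
      have hj := pvLastOne_lt xs j h
      simp; omega
    | none =>
      simp only [Option.map_none]
      by_cases hx : x = 1
      · subst hx
        simp [PySem.List.index?_eq_idxOf?, List.idxOf?_cons]
      · simp [PySem.List.index?_eq_idxOf?, List.idxOf?_cons, hx]

-- ===== VERDICT (by name: the statement is the Claim_ definition above) =====
theorem binary_mode_to_cascade_mode_spec : Claim_equal_binary_mode_to_cascade_mode := by
  intro l n _
  unfold Spec_binary_mode_to_cascade_mode binary_mode_to_cascade_mode binary_mode_to_cascade_mode_alt
  simp only [ite_self]
  rw [pvFoldA, pvIndexReverse]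
  cases h : pvLastOne l with
  | none =>
    have : (1 : Int) ∉ l := (pvLastOne_none_iff l).mp h
    simp [this]
  | some j =>
    have hj := pvLastOne_lt l j h
    have hmem : (1 : Int) ∈ l := by
      by_contra hn
      rw [(pvLastOne_none_iff l).mpr hn] at h; cases h
    simp only [hmem, if_pos, Option.map_some, Option.getD_some]
    push_cast [Nat.cast_sub (by omega : j ≤ l.length - 1), Nat.cast_sub (by omega : 1 ≤ l.length)]
    ring
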